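-- pv_equiv track=rewrite | github.com/newtglobalgit/DMAP-saas-user | main.py | create_branch_name
-- ===== SOURCE A (Python) =====
-- def create_branch_name(full_name):
--     """
--     Create a GitHub-compliant branch name from user's full name
--     Example: 'John Peter' -> 'john-peter-saas-offer-terraform'
--     """
--     # Convert to lowercase and replace spaces with hyphens
--     branch_name = full_name.lower().strip()
--     # Replace multiple spaces with single hyphen
--     branch_name = '-'.join(word for word in branch_name.split() if word)
--     # Add suffix
--     branch_name = f"{branch_name}-saas-offer-terraform"
--     # Remove any special characters except hyphens
--     branch_name = ''.join(c if c.isalnum() or c == '-' else '' for c in branch_name)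
--     # Remove multiple consecutive hyphens
--     while '--' in branch_name:
--         branch_name = branch_name.replace('--', '-')
--     # Remove leading/trailing hyphens
--     branch_name = branch_name.strip('-')
--     return branch_name
-- ===== SOURCE B (Python) =====
-- def create_branch_name(full_name):
--     res = []
--     pending = False
--     for c in full_name.lower():
--         if c.isalnum():
--             if pending and res:
--                 res.append('-')
--             res.append(c)
--             pending = False
--         elif c.isspace() or c == '-':
--             pending = True
--     core = ''.join(res)
--     return core + '-saas-offer-terraform' if core else 'saas-offer-terraform'
-- ===== Notes on version B (the rewrite author's own statement) =====
-- stated objective: alternative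
-- what changed: Replaces A's six-stage pipeline (lowercase and strip, whitespace split plus join, suffix append, character filter, a repeated double-hyphen collapse loop, and a final hyphen strip) by a single left-to-right pass over the lowered string with a result buffer and a pending-separator flag, appending the suffix at the end.
import Mathlib
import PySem

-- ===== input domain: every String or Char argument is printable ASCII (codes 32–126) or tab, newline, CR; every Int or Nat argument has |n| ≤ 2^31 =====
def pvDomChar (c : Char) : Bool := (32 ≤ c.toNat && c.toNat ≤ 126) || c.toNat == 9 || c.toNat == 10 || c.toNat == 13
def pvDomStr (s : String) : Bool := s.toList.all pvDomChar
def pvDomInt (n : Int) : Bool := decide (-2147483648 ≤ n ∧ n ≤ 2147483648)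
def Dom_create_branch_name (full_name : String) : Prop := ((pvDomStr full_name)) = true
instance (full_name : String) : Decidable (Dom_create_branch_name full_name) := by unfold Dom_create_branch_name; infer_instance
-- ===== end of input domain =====

-- B is a single left-to-right state-machine pass (result + pending-separator flag) instead of A's
-- six-stage pipeline (strip/split/join/filter/while-replace/strip); same return value, objective: alternative.

-- ===== PORT A =====
-- A-side helpers: the while-loop 'while "--" in s: s = s.replace("--","-")' needs a termination
-- argument, so the effect of one replace pass (pvRdd) and the presence of "--" (pvHasDD) are
-- characterised here; the port cites pvCollapse_decreasing in its decreasing_by.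

/-- One pass of s.replace("--","-") (left-to-right, non-overlapping). -/
def pvRdd : List Char → List Char
  | [] => []
  | [c] => [c]
  | a :: b :: t => if a = '-' ∧ b = '-' then '-' :: pvRdd t else a :: pvRdd (b :: t)

/-- '"--" in s' as a direct recursion: two adjacent hyphens exist. -/
def pvHasDD : List Char → Bool
  | [] => false
  | [_] => false
  | a :: b :: t => (a == '-' && b == '-') || pvHasDD (b :: t)

theorem pvRdd_length_le (s : List Char) : (pvRdd s).length ≤ s.length := by
  induction s using pvRdd.induct with
  | case1 => simp [pvRdd]
  | case2 c => simp [pvRdd]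
  | case3 a b t h ih =>
    rw [pvRdd, if_pos h]; simp only [List.length_cons]; omega
  | case4 a b t h ih =>
    rw [pvRdd, if_neg h]; simp only [List.length_cons] at *; omega

theorem pvHasDD_iff (s : List Char) : pvHasDD s = true ↔ ['-', '-'] <:+: s := by
  induction s using pvHasDD.induct with
  | case1 => simp [pvHasDD]
  | case2 c =>
    constructor
    · intro h; simp [pvHasDD] at h
    · intro h; have := h.length_le; simp at this
  | case3 a b t ih =>
    rw [pvHasDD, List.infix_cons_iff]
    simp only [Bool.or_eq_true, Bool.and_eq_true, beq_iff_eq, ih]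
    constructor
    · rintro (⟨ha, hb⟩ | h)
      · subst ha; subst hb
        exact Or.inl (by simp [List.cons_prefix_cons])
      · exact Or.inr h
    · rintro (h | h)
      · rcases List.cons_prefix_cons.mp h with ⟨rfl, h2⟩
        rcases List.cons_prefix_cons.mp h2 with ⟨rfl, _⟩
        exact Or.inl ⟨rfl, rfl⟩
      · exact Or.inr h

theorem pvRdd_length_lt (s : List Char) (h : pvHasDD s = true) : (pvRdd s).length < s.length := by
  induction s using pvRdd.induct with
  | case1 => simp [pvHasDD] at h
  | case2 c => simp [pvHasDD] at h
  | case3 a b t h2 ih =>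
    rw [pvRdd, if_pos h2]; simp only [List.length_cons]
    have := pvRdd_length_le t; omega
  | case4 a b t h2 ih =>
    rw [pvHasDD] at h
    simp only [Bool.or_eq_true, Bool.and_eq_true, beq_iff_eq] at h
    rcases h with ⟨ha, hb⟩ | h
    · exact absurd ⟨ha, hb⟩ h2
    · rw [pvRdd, if_neg h2]
      have := ih h; simp only [List.length_cons] at this ⊢; omega

theorem pvReplaceGo_eq (fuel : Nat) : ∀ (l acc : List Char), l.length ≤ fuel →
    PySem.Chars.replace.go ['-', '-'] ['-'] fuel l acc = acc.reverse ++ pvRdd l := by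
  induction fuel with
  | zero => intro l acc h; rw [List.length_eq_zero_iff.mp (Nat.le_zero.mp h)]; simp [PySem.Chars.replace.go, pvRdd]
  | succ n ih =>
    intro l acc h
    match l with
    | [] => simp [PySem.Chars.replace.go, pvRdd]
    | c :: t =>
      rw [PySem.Chars.replace.go]
      by_cases hp : (['-', '-'] : List Char).isPrefixOf (c :: t) = true
      · rw [if_pos hp]
        rcases t with _ | ⟨b, u⟩
        · simp [List.isPrefixOf] at hp
        · rw [List.isPrefixOf_iff_prefix] at hp
          rcases List.cons_prefix_cons.mp hp with ⟨rfl, h2⟩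
          rcases List.cons_prefix_cons.mp h2 with ⟨rfl, -⟩
          simp only [List.length_cons] at h
          rw [show List.drop ((['-','-'] : List Char).length) ('-' :: '-' :: u) = u by simp]
          rw [show (['-'] : List Char).reverse ++ acc = '-' :: acc from rfl]
          rw [ih u ('-' :: acc) (by omega)]
          rw [pvRdd, if_pos ⟨rfl, rfl⟩]
          simp
      · rw [if_neg hp]
        simp only [List.length_cons] at h
        rw [ih t (c :: acc) (by omega)]
        have hr : pvRdd (c :: t) = c :: pvRdd t := by
          rcases t with _ | ⟨b, u⟩
          · simp [pvRdd]
          · rw [pvRdd, if_neg]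
            rintro ⟨rfl, rfl⟩
            exact hp (by rw [List.isPrefixOf_iff_prefix]; simp [List.cons_prefix_cons])
        rw [hr]; simp

theorem pvReplace_eq (s : List Char) : PySem.Chars.replace s ['-', '-'] ['-'] = pvRdd s := by
  rw [PySem.Chars.replace]
  simp only [List.isEmpty_cons, Bool.false_eq_true, if_false]
  exact pvReplaceGo_eq s.length s [] le_rfl

theorem pvCollapse_decreasing (s : String) (h : PySem.Str.isIn "--" s = true) :
    (PySem.Str.replace s "--" "-").toList.length < s.toList.length := by
  rw [PySem.Str.toList_replace]
  have h2 : ("--" : String).toList = ['-','-'] := by decide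
  have h3 : ("-" : String).toList = ['-'] := by decide
  rw [h2, h3, pvReplace_eq]
  apply pvRdd_length_lt
  rw [pvHasDD_iff]
  rw [PySem.Str.isIn_iff_infix, h2] at h
  exact h

/-- while '--' in branch_name: branch_name = branch_name.replace('--', '-') -/
def pvCollapse (s : String) : String :=
  if h : PySem.Str.isIn "--" s then pvCollapse (PySem.Str.replace s "--" "-") else s
termination_by s.toList.length
decreasing_by exact pvCollapse_decreasing s h

def create_branch_name (full_name : String) : String :=
  let bn1 := PySem.Str.strip (PySem.Str.lower full_name)
  let bn2 := PySem.Str.join "-" ((PySem.Str.split₀ bn1).filter (fun w => w ≠ ""))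
  let bn3 := PySem.Str.join "" [bn2, "-saas-offer-terraform"]
  let bn4 := PySem.Str.join "" (bn3.toList.map (fun c =>
    if PySem.Chars.isalnum c || c == '-' then String.ofList [c] else ""))
  let bn5 := pvCollapse bn4
  PySem.Str.stripChars bn5 "-"

-- ===== PORT B =====
/-- the body of B's for-loop: state = (res, pending). -/
def pvBStep (st : List Char × Bool) (c : Char) : List Char × Bool :=
  if PySem.Chars.isalnum c then
    ((if st.2 && !st.1.isEmpty then st.1 ++ ['-'] else st.1) ++ [c], false)
  else if PySem.Chars.isspace c || c == '-' then (st.1, true)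
  else st

def create_branch_name_alt (full_name : String) : String :=
  let r := (PySem.Str.lower full_name).toList.foldl pvBStep ([], false)
  let core := PySem.Str.join "" (r.1.map (fun c => String.ofList [c]))
  if core ≠ "" then PySem.Str.join "" [core, "-saas-offer-terraform"]
  else "saas-offer-terraform"

-- ===== PRECONDITION & SPEC =====
def Spec_create_branch_name (full_name : String) (out : String) : Prop := out = create_branch_name_alt full_name
instance (full_name : String) (out : String) : Decidable (Spec_create_branch_name full_name out) := by unfold Spec_create_branch_name; infer_instance

-- ===== CLAIM (what is proved, stated in full; the proofs are below) =====
def Claim_equal_create_branch_name : Prop := ∀ (full_name : String), Dom_create_branch_name full_name → Spec_create_branch_name full_name (create_branch_name full_name)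

-- ===== LEMMAS AND PROOFS =====

-- Word machinery: a right fold that splits a character list into the maximal runs of 'keep'
-- characters, ignoring 'dropc' characters, breaking on everything else.
def pvPush (w : List Char) (ws : List (List Char)) : List (List Char) := if w = [] then ws else w :: ws

def pvStep (keep dropc : Char → Bool) (c : Char) (st : List Char × List (List Char)) :
    List Char × List (List Char) :=
  if keep c then (c :: st.1, st.2) else if dropc c then st else ([], pvPush st.1 st.2)

def pvMw (keep dropc : Char → Bool) (s : List Char) : List Char × List (List Char) :=
  s.foldr (pvStep keep dropc) ([], [])

def pvWords (keep dropc : Char → Bool) (s : List Char) : List (List Char) :=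
  pvPush (pvMw keep dropc s).1 (pvMw keep dropc s).2

def pvAl (c : Char) : Bool := PySem.Chars.isalnum c
def pvNoSp (c : Char) : Bool := !PySem.Chars.isspace c
def pvDropJ (c : Char) : Bool := !(pvAl c || PySem.Chars.isspace c || c == '-')
def pvFalse (_ : Char) : Bool := false
def pvKeepAD (c : Char) : Bool := PySem.Chars.isalnum c || c == '-'

/-- join the words with single hyphens -/
def pvInter : List (List Char) → List Char
  | [] => []
  | [w] => w
  | w :: v :: ws => w ++ '-' :: pvInter (v :: ws)

def pvSufW : List (List Char) :=
  [['s','a','a','s'], ['o','f','f','e','r'], ['t','e','r','r','a','f','o','r','m']]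

-- char-class facts
theorem pvAl_not_space (c : Char) (h : pvAl c = true) : PySem.Chars.isspace c = false := by
  simp only [pvAl, PySem.Chars.isalnum, PySem.Chars.isalpha, PySem.Chars.isdigit,
    PySem.Chars.isupper, PySem.Chars.islower, Bool.or_eq_true,
    Bool.and_eq_true, decide_eq_true_eq, Char.le_def, UInt32.le_iff_toNat_le] at h
  have hv : ∀ d : Char, d.val.toNat = d.toNat := fun _ => rfl
  simp only [hv, show ('0':Char).toNat = 48 from rfl, show ('9':Char).toNat = 57 from rfl,
    show ('A':Char).toNat = 65 from rfl, show ('Z':Char).toNat = 90 from rfl,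
    show ('a':Char).toNat = 97 from rfl, show ('z':Char).toNat = 122 from rfl] at h
  simp only [PySem.Chars.isspace, Bool.or_eq_false_iff, Bool.and_eq_false_iff,
    decide_eq_false_iff_not]
  omega

theorem pvAl_dash : pvAl '-' = false := by decide

-- basic machinery lemmas
theorem pvPush_append (w : List Char) (a b : List (List Char)) :
    pvPush w (a ++ b) = pvPush w a ++ b := by
  unfold pvPush; split_ifs <;> simp

theorem pvMw_cons (k d : Char → Bool) (c : Char) (t : List Char) :
    pvMw k d (c :: t) = pvStep k d c (pvMw k d t) := rfl

theorem pvFoldr_bottom (k d : Char → Bool) (x : List Char) (ws0 : List (List Char)) :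
    x.foldr (pvStep k d) ([], ws0) = ((pvMw k d x).1, (pvMw k d x).2 ++ ws0) := by
  induction x with
  | nil => simp [pvMw]
  | cons c t ih =>
    simp only [List.foldr_cons, ih, pvMw, pvStep]
    split_ifs <;> simp [pvPush_append]

theorem pvMw_append (k d : Char → Bool) (x y : List Char) :
    pvMw k d (x ++ y) = x.foldr (pvStep k d) (pvMw k d y) := by
  simp [pvMw, List.foldr_append]

theorem pvWords_ne_nil (k d : Char → Bool) (s : List Char) :
    ∀ w ∈ pvWords k d s, w ≠ [] := by
  have h : ∀ w ∈ (pvMw k d s).2, w ≠ [] := by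
    induction s with
    | nil => simp [pvMw]
    | cons c t ih =>
      simp only [pvMw, List.foldr_cons, pvStep] at *
      split_ifs
      · exact ih
      · exact ih
      · unfold pvPush; split_ifs with h2
        · exact ih
        · intro w hw; rcases List.mem_cons.mp hw with rfl | hw
          · exact h2
          · exact ih w hw
  intro w hw
  unfold pvWords pvPush at hw
  split_ifs at hw with h1
  · exact h w hw
  · rcases List.mem_cons.mp hw with rfl | hw
    · exact h1
    · exact h w hw

theorem pvMw_fst_ne_nil (k d : Char → Bool) (c : Char) (t : List Char) (h : k c = true) :
    (pvMw k d (c :: t)).1 ≠ [] := by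
  simp [pvMw, pvStep, h]

theorem pvWordsD_cons_dash (t : List Char) :
    pvWords pvAl pvFalse ('-' :: t) = pvWords pvAl pvFalse t := by
  simp [pvWords, pvMw, pvStep, pvAl_dash, pvFalse, pvPush]

theorem pvWordsD_append_dash (x y : List Char) :
    pvWords pvAl pvFalse (x ++ '-' :: y) = pvWords pvAl pvFalse x ++ pvWords pvAl pvFalse y := by
  have h1 : pvMw pvAl pvFalse ('-' :: y) = ([], pvWords pvAl pvFalse y) := by
    simp [pvMw, pvStep, pvAl_dash, pvFalse, pvWords]
  rw [pvWords, pvMw_append, h1]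
  rw [show (([], pvWords pvAl pvFalse y) : List Char × List (List Char)) =
    (([] : List Char), [] ++ pvWords pvAl pvFalse y) by simp]
  rw [pvFoldr_bottom]
  simp only []
  rw [show (pvMw pvAl pvFalse x).2 ++ ([] ++ pvWords pvAl pvFalse y) =
    (pvMw pvAl pvFalse x).2 ++ pvWords pvAl pvFalse y by simp]
  rw [pvPush_append]
  rfl

-- pvInter lemmas
theorem pvInter_eq_intercalate (ws : List (List Char)) :
    List.intercalate ['-'] ws = pvInter ws := by
  induction ws with
  | nil => simp [pvInter, List.intercalate]
  | cons w vs ih =>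
    cases vs with
    | nil => simp [pvInter, List.intercalate]
    | cons v us =>
      rw [pvInter, ← ih]
      simp [List.intercalate]

theorem pvInter_cons_of_ne (w : List Char) (ws : List (List Char)) (h : ws ≠ []) :
    pvInter (w :: ws) = w ++ '-' :: pvInter ws := by
  cases ws with
  | nil => exact absurd rfl h
  | cons v us => rfl

theorem pvInter_append_sufW (ws : List (List Char)) (h : ws ≠ []) :
    pvInter (ws ++ pvSufW) = pvInter ws ++ '-' :: pvInter pvSufW := by
  induction ws with
  | nil => exact absurd rfl h
  | cons w vs ih =>
    cases vs with
    | nil => simp [pvInter, pvSufW]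
    | cons v us =>
      rw [List.cons_append, pvInter_cons_of_ne w (v :: us ++ pvSufW) (by simp),
        ih (by simp), pvInter_cons_of_ne w (v :: us) (by simp)]
      simp

theorem pvInter_ne_nil (ws : List (List Char)) (hne : ∀ w ∈ ws, w ≠ []) (h : ws ≠ []) :
    pvInter ws ≠ [] := by
  cases ws with
  | nil => exact absurd rfl h
  | cons w vs =>
    cases vs with
    | nil => exact hne w (by simp)
    | cons v us =>
      rw [pvInter]
      simp only [ne_eq, List.append_eq_nil_iff]
      rintro ⟨-, h2⟩; cases h2

-- the filter stage
theorem pvIntercalate_nil_eq_flatten (xs : List (List Char)) :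
    List.intercalate [] xs = xs.flatten := by
  induction xs with
  | nil => simp [List.intercalate]
  | cons a t ih =>
    cases t with
    | nil => simp [List.intercalate]
    | cons b u =>
      rw [List.flatten_cons, ← ih]
      simp [List.intercalate]

theorem pvJoin_singletons_filter (p : Char → Bool) (l : List Char) :
    PySem.Chars.join [] (l.map (fun c => if p c then [c] else [])) = l.filter p := by
  rw [PySem.Chars.join, pvIntercalate_nil_eq_flatten]
  induction l with
  | nil => simp
  | cons c t ih =>
    simp only [List.map_cons, List.flatten_cons, ih, List.filter_cons]
    split_ifs <;> simp

theorem pvFilterAD_inter (ws : List (List Char)) :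
    (pvInter ws).filter pvKeepAD = pvInter (ws.map (List.filter pvKeepAD)) := by
  induction ws with
  | nil => simp [pvInter]
  | cons w vs ih =>
    cases vs with
    | nil => simp [pvInter]
    | cons v us =>
      have e1 : pvInter (w :: v :: us) = w ++ '-' :: pvInter (v :: us) := rfl
      have e2 : pvInter (List.filter pvKeepAD w :: List.map (List.filter pvKeepAD) (v :: us))
          = List.filter pvKeepAD w ++ '-' :: pvInter (List.map (List.filter pvKeepAD) (v :: us)) := rfl
      rw [e1, List.filter_append, List.filter_cons, List.map_cons, e2, ← ih]
      simp [show pvKeepAD '-' = true from by decide]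

-- machine composition: whitespace-split then junk-filter then dash-split = the direct machine
theorem pvFlatMap_push (w : List Char) (ws : List (List Char))
    (g : List Char → List (List Char)) (hg : g [] = []) :
    (pvPush w ws).flatMap g = g w ++ ws.flatMap g := by
  unfold pvPush; split_ifs with h
  · subst h; simp [hg]
  · simp

theorem pvComp (cs : List Char) :
    pvMw pvAl pvDropJ cs =
      ((pvMw pvAl pvFalse ((pvMw pvNoSp pvFalse cs).1.filter pvKeepAD)).1,
       (pvMw pvAl pvFalse ((pvMw pvNoSp pvFalse cs).1.filter pvKeepAD)).2
         ++ (pvMw pvNoSp pvFalse cs).2.flatMap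
              (fun w => pvWords pvAl pvFalse (w.filter pvKeepAD))) := by
  induction cs with
  | nil => simp [pvMw, pvWords]
  | cons c t ih =>
    by_cases hal : pvAl c = true
    · have hsp := pvAl_not_space c hal
      have hns : pvNoSp c = true := by simp [pvNoSp, hsp]
      have hk : pvKeepAD c = true := by
        simp only [pvKeepAD, Bool.or_eq_true]; exact Or.inl hal
      rw [pvMw_cons, pvMw_cons, pvStep, pvStep, if_pos hal, if_pos hns]
      dsimp only
      simp only [List.filter_cons, hk, if_pos]
      rw [pvMw_cons, pvStep, if_pos hal, ih]
    · by_cases hspc : PySem.Chars.isspace c = true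
      · have hns' : ¬ pvNoSp c = true := by simp [pvNoSp, hspc]
        have hdj' : ¬ pvDropJ c = true := by simp [pvDropJ, hspc]
        have hf : ¬ pvFalse c = true := by simp [pvFalse]
        rw [pvMw_cons, pvMw_cons, pvStep, pvStep, if_neg hal, if_neg hns', if_neg hdj', if_neg hf]
        dsimp only
        rw [ih]
        simp only [List.filter_nil, pvMw, List.foldr_nil, List.nil_append]
        rw [pvFlatMap_push _ _ _ (by simp [pvWords, pvMw, pvPush]), pvPush_append]
        rfl
      · by_cases hdash : c = '-'
        · subst hdash
          have hns : pvNoSp '-' = true := by decide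
          have hdj' : ¬ pvDropJ '-' = true := by decide
          have hal' : ¬ pvAl '-' = true := by decide
          have hf : ¬ pvFalse '-' = true := by decide
          have hk : pvKeepAD '-' = true := by decide
          rw [pvMw_cons, pvMw_cons, pvStep, pvStep, if_neg hal', if_pos hns, if_neg hdj']
          dsimp only
          simp only [List.filter_cons, hk, if_pos]
          rw [pvMw_cons, pvStep, if_neg hal', if_neg hf]
          rw [ih]
          dsimp only
          rw [pvPush_append]
        · have hns : pvNoSp c = true := by simp [pvNoSp, hspc]
          have hdj : pvDropJ c = true := by simp [pvDropJ, hal, hspc, hdash]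
          have hk' : pvKeepAD c = false := by
            simp only [pvKeepAD, Bool.or_eq_false_iff]
            exact ⟨by simpa [pvAl] using hal, by simp [hdash]⟩
          rw [pvMw_cons, pvMw_cons, pvStep, pvStep, if_neg hal, if_pos hns, if_pos hdj]
          dsimp only
          simp only [List.filter_cons, hk', Bool.false_eq_true, if_false]
          exact ih

theorem pvWordsAll_eq (cs : List Char) :
    pvWords pvAl pvDropJ cs =
      (pvWords pvNoSp pvFalse cs).flatMap (fun w => pvWords pvAl pvFalse (w.filter pvKeepAD)) := by
  rw [pvWords, pvComp]
  rw [show pvWords pvNoSp pvFalse cs = pvPush (pvMw pvNoSp pvFalse cs).1 (pvMw pvNoSp pvFalse cs).2 from rfl]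
  rw [pvFlatMap_push _ _ _ (by simp [pvWords, pvMw, pvPush])]
  rw [pvPush_append]
  rfl

theorem pvWordsD_inter (ws : List (List Char)) :
    pvWords pvAl pvFalse (pvInter (ws.map (List.filter pvKeepAD))) =
      ws.flatMap (fun w => pvWords pvAl pvFalse (w.filter pvKeepAD)) := by
  induction ws with
  | nil => simp [pvInter, pvWords, pvMw, pvPush]
  | cons w vs ih =>
    cases vs with
    | nil => simp [pvInter, pvWords]
    | cons v us =>
      rw [List.map_cons, pvInter_cons_of_ne _ _ (by simp), pvWordsD_append_dash, ih]
      simp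

-- split₀ characterisation
theorem pvSplitGo_eq (s : List Char) : ∀ (cur : List Char) (acc : List (List Char)),
    PySem.Chars.split₀.go s cur acc =
      acc.reverse ++ pvPush (cur.reverse ++ (pvMw pvNoSp pvFalse s).1) (pvMw pvNoSp pvFalse s).2 := by
  induction s with
  | nil =>
    intro cur acc
    rw [PySem.Chars.split₀.go]
    by_cases h : cur.isEmpty
    · rw [if_pos h, List.isEmpty_iff.mp h]
      simp [pvMw, pvPush]
    · rw [if_neg h]
      have hcur : cur ≠ [] := fun h2 => h (by simp [h2])
      have hcr : cur.reverse ≠ [] := by simp [hcur]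
      simp [pvMw, pvPush, hcr]
  | cons c rest ih =>
    intro cur acc
    rw [PySem.Chars.split₀.go]
    by_cases hsp : PySem.Chars.isspace c = true
    · have hns' : ¬ pvNoSp c = true := by simp [pvNoSp, hsp]
      have hf : ¬ pvFalse c = true := by simp [pvFalse]
      rw [if_pos hsp, pvMw_cons, pvStep, if_neg hns', if_neg hf]
      dsimp only
      by_cases hc : cur.isEmpty
      · rw [if_pos hc, ih, List.isEmpty_iff.mp hc]
        simp [pvPush]
      · rw [if_neg hc, ih]
        have hcur : cur ≠ [] := fun h2 => hc (by simp [h2])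
        have hcr : cur.reverse ≠ [] := by simp [hcur]
        simp [pvPush, hcr]
    · rw [if_neg hsp, ih, pvMw_cons, pvStep, if_pos (by simp [pvNoSp, hsp])]
      simp

theorem pvSplit₀_eq (s : List Char) : PySem.Chars.split₀ s = pvWords pvNoSp pvFalse s := by
  rw [PySem.Chars.split₀, pvSplitGo_eq]
  simp [pvWords]

-- strip invariance (for any machine that breaks on spaces)
theorem pvMw_spaces (k d : Char → Bool) (hk : ∀ c, PySem.Chars.isspace c = true → k c = false)
    (hd : ∀ c, PySem.Chars.isspace c = true → d c = false) (sp : List Char)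
    (hsp : ∀ c ∈ sp, PySem.Chars.isspace c = true) : pvMw k d sp = ([], []) := by
  induction sp with
  | nil => rfl
  | cons c t ih =>
    have hc := hsp c (by simp)
    rw [pvMw_cons, pvStep, if_neg (by simp [hk c hc]), if_neg (by simp [hd c hc]),
      ih (fun x hx => hsp x (by simp [hx]))]
    simp [pvPush]

theorem pvWords_strip (k d : Char → Bool) (hk : ∀ c, PySem.Chars.isspace c = true → k c = false)
    (hd : ∀ c, PySem.Chars.isspace c = true → d c = false) (s : List Char) :
    pvWords k d (PySem.Chars.strip s) = pvWords k d s := by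
  have hl : ∀ x : List Char, pvWords k d (PySem.Chars.lstrip x) = pvWords k d x := by
    intro x
    rw [PySem.Chars.lstrip]
    induction x with
    | nil => simp
    | cons c t ih =>
      by_cases hc : PySem.Chars.isspace c = true
      · rw [List.dropWhile_cons_of_pos hc, ih]
        have hcons : pvWords k d (c :: t) = pvWords k d t := by
          rw [pvWords, pvMw_cons, pvStep, if_neg (by simp [hk c hc]), if_neg (by simp [hd c hc])]
          dsimp only
          simp [pvPush, pvWords]
        rw [hcons]
      · rw [List.dropWhile_cons_of_neg (by simp [hc])]
  have hr : ∀ x : List Char, pvWords k d (PySem.Chars.rstrip x) = pvWords k d x := by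
    intro x
    have hsplit : PySem.Chars.rstrip x ++ (List.takeWhile PySem.Chars.isspace x.reverse).reverse = x := by
      rw [PySem.Chars.rstrip]
      rw [← List.reverse_append, List.takeWhile_append_dropWhile, List.reverse_reverse]
    have hmem : ∀ c ∈ (List.takeWhile PySem.Chars.isspace x.reverse).reverse,
        PySem.Chars.isspace c = true := by
      intro c hc
      exact List.mem_takeWhile_imp (List.mem_reverse.mp hc)
    conv_rhs => rw [← hsplit]
    rw [pvWords, pvWords, pvMw_append,
      pvMw_spaces k d hk hd _ hmem]
    rfl
  rw [PySem.Chars.strip, hr, hl]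

-- the collapse loop
theorem pvMw_rdd (s : List Char) : pvMw pvAl pvFalse (pvRdd s) = pvMw pvAl pvFalse s := by
  have hstep : ∀ x : List Char × List (List Char),
      pvStep pvAl pvFalse '-' (pvStep pvAl pvFalse '-' x) = pvStep pvAl pvFalse '-' x := by
    intro x
    rw [pvStep, pvStep, if_neg (by decide), if_neg (by decide), if_neg (by decide),
      if_neg (by decide)]
    simp [pvPush]
  induction s using pvRdd.induct with
  | case1 => rfl
  | case2 c => rfl
  | case3 a b t h ih =>
    obtain ⟨rfl, rfl⟩ := h
    rw [pvRdd, if_pos ⟨rfl, rfl⟩, pvMw_cons, ih, pvMw_cons, pvMw_cons, hstep]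
  | case4 a b t h ih =>
    rw [pvRdd, if_neg h, pvMw_cons, ih, pvMw_cons]
    rfl

theorem pvRdd_mem (s : List Char) : ∀ c ∈ pvRdd s, c ∈ s := by
  induction s using pvRdd.induct with
  | case1 => simp [pvRdd]
  | case2 c => simp [pvRdd]
  | case3 a b t h ih =>
    obtain ⟨rfl, rfl⟩ := h
    rw [pvRdd, if_pos ⟨rfl, rfl⟩]
    intro c hc
    rcases List.mem_cons.mp hc with rfl | hc
    · simp
    · simp [ih c hc]
  | case4 a b t h ih =>
    rw [pvRdd, if_neg h]
    intro c hc
    rcases List.mem_cons.mp hc with rfl | hc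
    · simp
    · simp [ih c hc]

theorem pvCollapse_spec (s : String) :
    pvWords pvAl pvFalse (pvCollapse s).toList = pvWords pvAl pvFalse s.toList ∧
    pvHasDD (pvCollapse s).toList = false ∧
    (∀ c ∈ (pvCollapse s).toList, c ∈ s.toList) := by
  suffices H : ∀ n (s : String), s.toList.length ≤ n →
      pvWords pvAl pvFalse (pvCollapse s).toList = pvWords pvAl pvFalse s.toList ∧
      pvHasDD (pvCollapse s).toList = false ∧
      (∀ c ∈ (pvCollapse s).toList, c ∈ s.toList) from H _ s le_rfl
  intro n
  induction n using Nat.strong_induction_on with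
  | _ n ih =>
    intro s hs
    rw [pvCollapse]
    split_ifs with h
    · have hrep : (PySem.Str.replace s "--" "-").toList = pvRdd s.toList := by
        rw [PySem.Str.toList_replace, show ("--" : String).toList = ['-','-'] from by decide,
          show ("-" : String).toList = ['-'] from by decide, pvReplace_eq]
      have hdd : pvHasDD s.toList = true := by
        rw [pvHasDD_iff]
        rw [PySem.Str.isIn_iff_infix, show ("--" : String).toList = ['-','-'] from by decide] at h
        exact h
      have hlt : (PySem.Str.replace s "--" "-").toList.length < s.toList.length := by
        rw [hrep]; exact pvRdd_length_lt _ hdd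
      have hle : (PySem.Str.replace s "--" "-").toList.length ≤ (PySem.Str.replace s "--" "-").toList.length := le_rfl
      have hn : (PySem.Str.replace s "--" "-").toList.length < n := lt_of_lt_of_le hlt hs
      obtain ⟨h1, h2, h3⟩ := ih _ hn (PySem.Str.replace s "--" "-") le_rfl
      refine ⟨?_, h2, ?_⟩
      · rw [h1, hrep, pvWords, pvWords, pvMw_rdd]
      · intro c hc
        have := h3 c hc
        rw [hrep] at this
        exact pvRdd_mem _ c this
    · have hf : PySem.Str.isIn "--" s = false := by
        cases hb : PySem.Str.isIn "--" s
        · rfl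
        · exact absurd hb h
      refine ⟨rfl, ?_, fun c hc => hc⟩
      cases hdd : pvHasDD s.toList
      · rfl
      · exfalso
        apply h
        rw [PySem.Str.isIn_iff_infix, show ("--" : String).toList = ['-','-'] from by decide]
        exact (pvHasDD_iff _).mp hdd

-- the final strip('-') stage
def pvPd (c : Char) : Bool := (['-'] : List Char).contains c

def pvRstripD (l : List Char) : List Char := (List.dropWhile pvPd l.reverse).reverse

theorem pvPd_eq (c : Char) : pvPd c = (c == '-') := by
  cases h : c == '-'
  · simp [pvPd, List.contains_cons]
    intro h2
    subst h2
    simp at h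
  · simp [pvPd, List.contains_cons]
    exact eq_of_beq h

theorem pvRstripD_cons (c : Char) (t : List Char) (h : pvPd c = false) :
    pvRstripD (c :: t) = c :: pvRstripD t := by
  rw [pvRstripD, List.reverse_cons, List.dropWhile_append]
  split_ifs with h1
  · rw [List.isEmpty_iff] at h1
    rw [pvRstripD, h1]
    simp [List.dropWhile_cons, h]
  · simp [pvRstripD]

theorem pvRstripD_dash_cons (x : List Char) (hx : ∃ d ∈ x, pvPd d = false) :
    pvRstripD ('-' :: x) = '-' :: pvRstripD x := by
  rw [pvRstripD, List.reverse_cons, List.dropWhile_append]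
  have hne : ¬ (List.dropWhile pvPd x.reverse).isEmpty = true := by
    rw [List.isEmpty_iff, List.dropWhile_eq_nil_iff]
    intro hall
    obtain ⟨d, hd, hpd⟩ := hx
    exact absurd (hall d (List.mem_reverse.mpr hd)) (by simp [hpd])
  rw [if_neg hne]
  simp [pvRstripD]

theorem pvWordsD_dropWhile (l : List Char) :
    pvWords pvAl pvFalse (List.dropWhile pvPd l) = pvWords pvAl pvFalse l := by
  induction l with
  | nil => rfl
  | cons c t ih =>
    by_cases hc : pvPd c = true
    · rw [List.dropWhile_cons_of_pos hc, ih]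
      have : c = '-' := by
        rw [pvPd_eq] at hc
        exact eq_of_beq hc
      subst this
      exact (pvWordsD_cons_dash t).symm
    · rw [List.dropWhile_cons_of_neg hc]

theorem pvHasDD_tail (c : Char) (t : List Char) (h : pvHasDD (c :: t) = false) :
    pvHasDD t = false := by
  cases t with
  | nil => rfl
  | cons b u =>
    rw [pvHasDD, Bool.or_eq_false_iff] at h
    exact h.2

theorem pvPush_ne (w : List Char) (ws : List (List Char)) (h : w ≠ []) :
    pvPush w ws = w :: ws := if_neg h

theorem pvPush_nil_left (ws : List (List Char)) : pvPush [] ws = ws := if_pos rfl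

theorem pvMwD_cons_al (c : Char) (t : List Char) (h : pvAl c = true) :
    pvMw pvAl pvFalse (c :: t) = (c :: (pvMw pvAl pvFalse t).1, (pvMw pvAl pvFalse t).2) := by
  rw [pvMw_cons, pvStep, if_pos h]

theorem pvMwD_cons_dash (t : List Char) :
    pvMw pvAl pvFalse ('-' :: t) =
      ([], pvPush (pvMw pvAl pvFalse t).1 (pvMw pvAl pvFalse t).2) := by
  rw [pvMw_cons, pvStep, if_neg (by decide), if_neg (by decide)]

theorem pvPd_of_al (c : Char) (h : pvAl c = true) : pvPd c = false := by
  rw [pvPd_eq]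
  cases hb : c == '-'
  · rfl
  · exfalso
    have : c = '-' := eq_of_beq hb
    subst this
    exact absurd h (by decide)

theorem pvDash_of_not_al (c : Char) (h2 : pvKeepAD c = true) (h : ¬ pvAl c = true) : c = '-' := by
  rw [pvKeepAD, Bool.or_eq_true] at h2
  rcases h2 with h2 | h2
  · exact absurd h2 h
  · exact eq_of_beq h2

theorem pvInter_cons_head (c : Char) (m1 : List Char) (m2 : List (List Char)) :
    pvInter ((c :: m1) :: m2) = c :: pvInter (m1 :: m2) := by
  cases m2 with
  | nil => rfl
  | cons v us => rw [pvInter, pvInter]; rfl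

theorem pvInterWords_single (c : Char) (hc : pvAl c = true) :
    pvInter (pvWords pvAl pvFalse [c]) = [c] := by
  rw [pvWords, pvMwD_cons_al c [] hc]
  simp [pvMw, pvPush, pvInter]

theorem pvInterWords_cons_al (c : Char) (t : List Char) (hc : pvAl c = true)
    (hm1 : (pvMw pvAl pvFalse t).1 ≠ []) :
    pvInter (pvWords pvAl pvFalse (c :: t)) = c :: pvInter (pvWords pvAl pvFalse t) := by
  rw [pvWords, pvMwD_cons_al c t hc]
  dsimp only
  rw [pvPush_ne _ _ (by simp), pvWords, pvPush_ne _ _ hm1, pvInter_cons_head]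

theorem pvInterWords_cons_dash (c : Char) (x : List Char) (hc : pvAl c = true)
    (hm1 : (pvMw pvAl pvFalse x).1 ≠ []) :
    pvInter (pvWords pvAl pvFalse (c :: '-' :: x)) =
      c :: '-' :: pvInter (pvWords pvAl pvFalse x) := by
  rw [pvWords, pvMwD_cons_al c _ hc]
  dsimp only
  rw [pvMwD_cons_dash]
  dsimp only
  rw [pvPush_ne _ _ hm1, pvPush_ne _ _ (by simp), pvInter_cons_head, pvWords,
    pvPush_ne _ _ hm1]
  rfl

theorem pvInterWords_cons_dash_nil (c : Char) (hc : pvAl c = true) :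
    pvInter (pvWords pvAl pvFalse [c, '-']) = [c] := by
  rw [pvWords, pvMwD_cons_al c _ hc]
  dsimp only
  rw [pvMwD_cons_dash]
  simp [pvMw, pvPush, pvInter]

theorem pvRstripD_eq (n : Nat) : ∀ (l : List Char), l.length ≤ n →
    pvHasDD l = false → (∀ c ∈ l, pvKeepAD c = true) →
    (∃ c t, l = c :: t ∧ pvAl c = true) →
    pvRstripD l = pvInter (pvWords pvAl pvFalse l) := by
  induction n with
  | zero =>
    intro l hl _ _ hex
    obtain ⟨c, t, rfl, -⟩ := hex
    simp at hl
  | succ n ih =>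
    rintro l hl h1 h2 ⟨c, t, rfl, hc⟩
    have hpdc : pvPd c = false := pvPd_of_al c hc
    cases t with
    | nil =>
      rw [pvRstripD_cons c [] hpdc, show pvRstripD [] = [] from rfl,
        pvInterWords_single c hc]
    | cons b u =>
      by_cases hb : pvAl b = true
      · have hm1 : (pvMw pvAl pvFalse (b :: u)).1 ≠ [] := pvMw_fst_ne_nil pvAl pvFalse b u hb
        rw [pvRstripD_cons c _ hpdc,
          ih (b :: u) (by simp at hl ⊢; omega) (pvHasDD_tail _ _ h1)
            (fun x hx => h2 x (by simp [hx])) ⟨b, u, rfl, hb⟩,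
          pvInterWords_cons_al c _ hc hm1]
      · have hbd : b = '-' := pvDash_of_not_al b (h2 b (by simp)) hb
        subst hbd
        cases u with
        | nil =>
          rw [pvRstripD_cons c _ hpdc,
            show pvRstripD ['-'] = [] from by rw [pvRstripD]; rfl,
            pvInterWords_cons_dash_nil c hc]
        | cons a u' =>
          have ha : pvAl a = true := by
            have hka := h2 a (by simp)
            by_contra hna
            have : a = '-' := pvDash_of_not_al a hka hna
            subst this
            rw [pvHasDD, pvHasDD] at h1
            simp at h1
          have hpda : pvPd a = false := pvPd_of_al a ha
          have hm1 : (pvMw pvAl pvFalse (a :: u')).1 ≠ [] := pvMw_fst_ne_nil pvAl pvFalse a u' ha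
          rw [pvRstripD_cons c _ hpdc,
            pvRstripD_dash_cons (a :: u') ⟨a, by simp, hpda⟩,
            ih (a :: u') (by simp at hl ⊢; omega)
              (pvHasDD_tail _ _ (pvHasDD_tail _ _ h1))
              (fun x hx => h2 x (by simp at hx ⊢; tauto)) ⟨a, u', rfl, ha⟩,
            pvInterWords_cons_dash c _ hc hm1]

theorem pvStrip_eq (l : List Char) (h1 : pvHasDD l = false)
    (h2 : ∀ c ∈ l, pvKeepAD c = true) :
    PySem.Chars.stripChars l ['-'] = pvInter (pvWords pvAl pvFalse l) := by
  have hdef : PySem.Chars.stripChars l ['-'] = pvRstripD (List.dropWhile pvPd l) := rfl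
  rw [hdef]
  cases hl' : List.dropWhile pvPd l with
  | nil =>
    rw [show pvRstripD [] = [] from rfl]
    have : pvWords pvAl pvFalse l = [] := by
      rw [← pvWordsD_dropWhile, hl']
      rfl
    rw [this]
    rfl
  | cons c t =>
    have hpd : pvPd c = false := by
      have := List.head?_dropWhile_not pvPd l
      rw [hl'] at this
      simpa using this
    have hc : pvAl c = true := by
      have hmem : c ∈ l := by
        have hsub : (List.dropWhile pvPd l).Sublist l := List.dropWhile_sublist pvPd
        exact hsub.mem (by rw [hl']; simp)
      have hka := h2 c hmem
      rw [pvKeepAD, Bool.or_eq_true] at hka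
      rcases hka with hka | hka
      · exact hka
      · exfalso
        have : c = '-' := eq_of_beq hka
        subst this
        rw [pvPd_eq] at hpd
        simp at hpd
    have hdd' : pvHasDD (c :: t) = false := by
      cases hdd : pvHasDD (c :: t)
      · rfl
      · exfalso
        have hinf : ['-','-'] <:+: (c :: t) := (pvHasDD_iff _).mp hdd
        have hsuf : (c :: t) <:+ l := by rw [← hl']; exact List.dropWhile_suffix pvPd
        have : ['-','-'] <:+: l := hinf.trans hsuf.isInfix
        rw [← pvHasDD_iff] at this
        rw [this] at h1
        cases h1
    have hall : ∀ x ∈ (c :: t), pvKeepAD x = true := by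
      intro x hx
      have hsub : (List.dropWhile pvPd l).Sublist l := List.dropWhile_sublist pvPd
      exact h2 x (hsub.mem (by rw [hl']; exact hx))
    rw [pvRstripD_eq (c :: t).length (c :: t) le_rfl hdd' hall ⟨c, t, rfl, hc⟩]
    rw [← pvWordsD_dropWhile l, hl']

-- B-side fold characterisation
def pvRTail (p : Bool) (cs : List Char) : List Char :=
  if (pvMw pvAl pvDropJ cs).1 = [] then
    (if (pvMw pvAl pvDropJ cs).2 = [] then [] else '-' :: pvInter (pvMw pvAl pvDropJ cs).2)
  else (if p then ['-'] else []) ++ pvInter ((pvMw pvAl pvDropJ cs).1 :: (pvMw pvAl pvDropJ cs).2)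

theorem pvMwA_cons_al (c : Char) (t : List Char) (h : pvAl c = true) :
    pvMw pvAl pvDropJ (c :: t) = (c :: (pvMw pvAl pvDropJ t).1, (pvMw pvAl pvDropJ t).2) := by
  rw [pvMw_cons, pvStep, if_pos h]

theorem pvMwA_cons_sep (c : Char) (t : List Char) (hal : ¬ pvAl c = true)
    (hsep : (PySem.Chars.isspace c || c == '-') = true) :
    pvMw pvAl pvDropJ (c :: t) =
      ([], pvPush (pvMw pvAl pvDropJ t).1 (pvMw pvAl pvDropJ t).2) := by
  have hdj : ¬ pvDropJ c = true := by
    simp only [pvDropJ, Bool.not_eq_true', Bool.not_eq_false]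
    rcases Bool.or_eq_true _ _ |>.mp hsep with h | h <;> simp [h]
  rw [pvMw_cons, pvStep, if_neg hal, if_neg hdj]

theorem pvMwA_cons_junk (c : Char) (t : List Char) (hdj : pvDropJ c = true) :
    pvMw pvAl pvDropJ (c :: t) = pvMw pvAl pvDropJ t := by
  have hal : ¬ pvAl c = true := by
    simp only [pvDropJ, Bool.not_eq_true', Bool.not_eq_false] at hdj ⊢
    simp only [Bool.or_eq_false_iff] at hdj
    simp [hdj.1.1]
  rw [pvMw_cons, pvStep, if_neg hal, if_pos hdj]

theorem pvRTail_true_of_fst_ne (cs : List Char) (h : (pvMw pvAl pvDropJ cs).1 ≠ []) :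
    pvRTail true cs = '-' :: pvRTail false cs := by
  rw [pvRTail, pvRTail, if_neg h, if_neg h]
  rfl

theorem pvRTail_cons_sep (c : Char) (t : List Char) (hal : ¬ pvAl c = true)
    (hsep : (PySem.Chars.isspace c || c == '-') = true) (p : Bool) :
    pvRTail p (c :: t) = pvRTail true t := by
  rw [pvRTail, pvRTail, pvMwA_cons_sep c t hal hsep]
  dsimp only
  rw [if_pos rfl]
  by_cases h1 : (pvMw pvAl pvDropJ t).1 = []
  · rw [if_pos h1, h1, pvPush_nil_left]
  · rw [if_neg h1, pvPush_ne _ _ h1]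
    rw [if_neg (by simp)]
    simp

theorem pvWordsA_cons_sep (c : Char) (t : List Char) (hal : ¬ pvAl c = true)
    (hsep : (PySem.Chars.isspace c || c == '-') = true) :
    pvWords pvAl pvDropJ (c :: t) = pvWords pvAl pvDropJ t := by
  rw [pvWords, pvMwA_cons_sep c t hal hsep]
  dsimp only
  rw [pvPush_nil_left]
  rfl

theorem pvRTail_al (c : Char) (t : List Char) (h : pvAl c = true) :
    pvRTail false (c :: t) = c :: pvRTail false t ∧
    pvInter (pvWords pvAl pvDropJ (c :: t)) = c :: pvRTail false t := by
  have hm := pvMwA_cons_al c t h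
  have hfst : pvRTail false (c :: t) = c :: pvRTail false t := by
    rw [pvRTail, pvRTail, hm]
    dsimp only
    rw [if_neg (by simp)]
    by_cases h1 : (pvMw pvAl pvDropJ t).1 = []
    · rw [if_pos h1, h1]
      by_cases h2 : (pvMw pvAl pvDropJ t).2 = []
      · rw [if_pos h2, h2]
        rfl
      · rw [if_neg h2, pvInter_cons_of_ne _ _ h2]
        rfl
    · rw [if_neg h1, pvInter_cons_head]
      rfl
  refine ⟨hfst, ?_⟩
  rw [← hfst, pvWords, hm]
  dsimp only
  rw [pvPush_ne _ _ (by simp), pvRTail, hm]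
  dsimp only
  rw [if_neg (by simp)]
  rfl

theorem pvFoldB (cs : List Char) : ∀ (r : List Char) (p : Bool),
    (cs.foldl pvBStep (r, p)).1 =
      if r = [] then pvInter (pvWords pvAl pvDropJ cs) else r ++ pvRTail p cs := by
  induction cs with
  | nil =>
    intro r p
    simp only [List.foldl_nil]
    split_ifs with h
    · rw [h]; rfl
    · rw [pvRTail]
      simp [pvMw]
  | cons c t ih =>
    intro r p
    rw [List.foldl_cons]
    by_cases hal : pvAl c = true
    · have hal' : PySem.Chars.isalnum c = true := hal
      rw [pvBStep, if_pos hal']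
      dsimp only
      rw [ih, if_neg (by simp)]
      by_cases hr : r = []
      · subst hr
        rw [if_pos rfl]
        simp only [List.isEmpty_nil, Bool.not_true, Bool.and_false, Bool.false_eq_true,
          if_false, List.nil_append]
        rw [(pvRTail_al c t hal).2]
        rfl
      · rw [if_neg hr]
        cases p with
        | false =>
          simp only [Bool.false_and, Bool.false_eq_true, if_false]
          rw [(pvRTail_al c t hal).1]
          simp
        | true =>
          have hie : r.isEmpty = false := by
            cases r
            · exact absurd rfl hr
            · rfl
          simp only [hie, Bool.not_false, Bool.true_and, if_true]
          rw [pvRTail_true_of_fst_ne (c :: t) (by rw [pvMwA_cons_al c t hal]; simp),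
            (pvRTail_al c t hal).1]
          simp
    · have hal' : ¬ PySem.Chars.isalnum c = true := hal
      by_cases hsep : (PySem.Chars.isspace c || c == '-') = true
      · rw [pvBStep, if_neg hal', if_pos hsep]
        dsimp only
        rw [ih]
        by_cases hr : r = []
        · rw [if_pos hr, if_pos hr, pvWordsA_cons_sep c t hal hsep]
        · rw [if_neg hr, if_neg hr, pvRTail_cons_sep c t hal hsep]
      · have hdj : pvDropJ c = true := by
          simp only [Bool.or_eq_true, not_or, Bool.not_eq_true] at hsep
          rw [pvDropJ, show pvAl c = false from by simpa using hal, hsep.1, hsep.2]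
          rfl
        rw [pvBStep, if_neg hal', if_neg (by simp [hsep])]
        have hmw := pvMwA_cons_junk c t hdj
        rw [ih]
        by_cases hr : r = []
        · rw [if_pos hr, if_pos hr, pvWords, pvWords, hmw]
        · rw [if_neg hr, if_neg hr, pvRTail, pvRTail, hmw]

-- side assemblies
theorem pvStr_ne_empty_iff (w : String) : (w ≠ "") ↔ (w.toList ≠ []) := by
  constructor
  · intro h hl
    exact h (by rw [← String.ofList_toList (s := w), hl])
  · intro h hw
    subst hw
    exact h rfl

theorem pvA_toList (f : String) :
    (create_branch_name f).toList =
      pvInter (pvWords pvAl pvDropJ (PySem.Chars.lower f.toList) ++ pvSufW) := by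
  rw [create_branch_name]
  set low := PySem.Chars.lower f.toList with hlow
  -- bn2
  have h1 : (PySem.Str.strip (PySem.Str.lower f)).toList = PySem.Chars.strip low := by
    rw [PySem.Str.toList_strip, PySem.Str.toList_lower]
  have hsplit : PySem.Chars.split₀ (PySem.Chars.strip low) = pvWords pvNoSp pvFalse low := by
    rw [pvSplit₀_eq]
    exact pvWords_strip pvNoSp pvFalse (fun c hc => by simp [pvNoSp, hc])
      (fun c hc => rfl) low
  have hfilt : List.map String.toList
      ((PySem.Str.split₀ (PySem.Str.strip (PySem.Str.lower f))).filter (fun w => w ≠ ""))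
      = pvWords pvNoSp pvFalse low := by
    have hq : (fun w : String => decide (w ≠ "")) = (fun x : List Char => decide (x ≠ [])) ∘ String.toList := by
      funext w
      simp only [Function.comp_apply, decide_eq_decide]
      exact pvStr_ne_empty_iff w
    rw [show ((PySem.Str.split₀ (PySem.Str.strip (PySem.Str.lower f))).filter (fun w => w ≠ ""))
        = (PySem.Str.split₀ (PySem.Str.strip (PySem.Str.lower f))).filter
            ((fun x : List Char => decide (x ≠ [])) ∘ String.toList) from by rw [← hq]]
    rw [← List.filter_map]
    rw [PySem.Str.split₀_map_toList, h1, hsplit]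
    apply List.filter_eq_self.mpr
    intro a ha
    simpa using pvWords_ne_nil pvNoSp pvFalse low a ha
  have hbn2 : (PySem.Str.join "-" ((PySem.Str.split₀ (PySem.Str.strip (PySem.Str.lower f))).filter
      (fun w => w ≠ ""))).toList = pvInter (pvWords pvNoSp pvFalse low) := by
    rw [PySem.Str.toList_join, hfilt, show ("-" : String).toList = ['-'] from rfl,
      PySem.Chars.join, pvInter_eq_intercalate]
  -- bn3
  have hbn3 : (PySem.Str.join "" [PySem.Str.join "-" ((PySem.Str.split₀ (PySem.Str.strip (PySem.Str.lower f))).filter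
      (fun w => w ≠ "")), "-saas-offer-terraform"]).toList
      = pvInter (pvWords pvNoSp pvFalse low) ++ '-' :: "saas-offer-terraform".toList := by
    rw [PySem.Str.toList_join, show ("" : String).toList = [] from rfl]
    rw [List.map_cons, List.map_cons, List.map_nil, hbn2]
    rw [PySem.Chars.join, pvIntercalate_nil_eq_flatten]
    simp
  generalize hbn3v : (PySem.Str.join "" [PySem.Str.join "-" ((PySem.Str.split₀ (PySem.Str.strip (PySem.Str.lower f))).filter
      (fun w => w ≠ "")), "-saas-offer-terraform"]) = bn3 at hbn3
  -- bn4
  have hbn4 : (PySem.Str.join "" (bn3.toList.map (fun c =>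
      if PySem.Chars.isalnum c || c == '-' then String.ofList [c] else ""))).toList
      = bn3.toList.filter pvKeepAD := by
    rw [PySem.Str.toList_join, show ("" : String).toList = [] from rfl, List.map_map]
    rw [show (String.toList ∘ fun c => if PySem.Chars.isalnum c || c == '-' then String.ofList [c] else "")
        = (fun c => if pvKeepAD c then [c] else []) from by
      funext c
      simp only [Function.comp_apply, pvKeepAD]
      split_ifs with h
      · exact String.toList_ofList
      · rfl]
    exact pvJoin_singletons_filter pvKeepAD bn3.toList
  generalize hbn4v : (PySem.Str.join "" (bn3.toList.map (fun c =>
      if PySem.Chars.isalnum c || c == '-' then String.ofList [c] else ""))) = bn4 at hbn4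
  -- the words of bn4
  have hwords4 : pvWords pvAl pvFalse bn4.toList = pvWords pvAl pvDropJ low ++ pvSufW := by
    rw [hbn4, hbn3, List.filter_append, pvFilterAD_inter]
    rw [show List.filter pvKeepAD ('-' :: "saas-offer-terraform".toList)
        = '-' :: "saas-offer-terraform".toList from by decide]
    rw [pvWordsD_append_dash, pvWordsD_inter, ← pvWordsAll_eq]
    rw [show pvWords pvAl pvFalse "saas-offer-terraform".toList = pvSufW from by decide]
  -- collapse and strip
  obtain ⟨hc1, hc2, hc3⟩ := pvCollapse_spec bn4
  rw [PySem.Str.toList_stripChars, show ("-" : String).toList = ['-'] from rfl]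
  rw [pvStrip_eq _ hc2 ?hall]
  case hall =>
    intro c hcm
    have := hc3 c hcm
    rw [hbn4] at this
    exact (List.mem_filter.mp this).2
  rw [hc1, hwords4]

theorem pvB_toList (f : String) :
    (create_branch_name_alt f).toList =
      pvInter (pvWords pvAl pvDropJ (PySem.Chars.lower f.toList) ++ pvSufW) := by
  rw [create_branch_name_alt]
  set low := PySem.Chars.lower f.toList with hlow
  have hlow' : (PySem.Str.lower f).toList = low := PySem.Str.toList_lower f
  rw [hlow']
  have hr : (low.foldl pvBStep ([], false)).1 = pvInter (pvWords pvAl pvDropJ low) := by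
    rw [pvFoldB, if_pos rfl]
  have hcore : (PySem.Str.join "" ((low.foldl pvBStep ([], false)).1.map
      (fun c => String.ofList [c]))).toList = pvInter (pvWords pvAl pvDropJ low) := by
    rw [PySem.Str.toList_join, show ("" : String).toList = [] from rfl, List.map_map]
    rw [show (String.toList ∘ fun c => String.ofList [c]) = (fun c : Char => [c]) from by
      funext c; exact String.toList_ofList]
    rw [PySem.Chars.join_nil_singletons, hr]
  generalize hcv : (PySem.Str.join "" ((low.foldl pvBStep ([], false)).1.map
      (fun c => String.ofList [c]))) = core at hcore
  by_cases hW : pvWords pvAl pvDropJ low = []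
  · have hcoree : core = "" := by
      rw [← String.ofList_toList (s := core), hcore, hW]
      rfl
    rw [if_neg (by simp [hcoree])]
    rw [hW]
    decide
  · have hne : core ≠ "" := by
      rw [pvStr_ne_empty_iff, hcore]
      exact pvInter_ne_nil _ (pvWords_ne_nil _ _ _) hW
    rw [if_pos hne]
    rw [PySem.Str.toList_join, show ("" : String).toList = [] from rfl]
    rw [List.map_cons, List.map_cons, List.map_nil, hcore]
    rw [PySem.Chars.join, pvIntercalate_nil_eq_flatten]
    rw [pvInter_append_sufW _ hW]
    rw [show pvInter pvSufW = "saas-offer-terraform".toList from by decide]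
    simp

-- ===== VERDICT (by name: the statement is the Claim_ definition above) =====
theorem create_branch_name_spec : Claim_equal_create_branch_name := by
  intro f _
  unfold Spec_create_branch_name
  have h : (create_branch_name f).toList = (create_branch_name_alt f).toList :=
    (pvA_toList f).trans (pvB_toList f).symm
  calc create_branch_name f = String.ofList (create_branch_name f).toList := String.ofList_toList.symm
    _ = String.ofList (create_branch_name_alt f).toList := by rw [h]
    _ = create_branch_name_alt f := String.ofList_toList
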